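-- pv_equiv track=rewrite | github.com/M3RG-IITD/DiSCoMaT | code/baseline_comparison/tabert_baseline_model.py | get_max_possible_cells
-- ===== SOURCE A (Python) =====
-- def get_max_possible_cells(input_ids, curr_len):
--     curr_len += 1 # one for last SEP in end
--     num_cells = 0
--     for l in input_ids:
--         curr_len += max(len(l) - 2, 1)
--         if curr_len > 512: break
--         num_cells += 1
--     return num_cells
-- ===== SOURCE B (Python) =====
-- def get_max_possible_cells(input_ids, curr_len):
--     # Prefix-sum table of per-cell increments, then binary search for the budget.
--     prefix = []
--     s = 0
--     for l in input_ids: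
--         s += max(len(l) - 2, 1)
--         prefix.append(s)
--     budget = 512 - (curr_len + 1)
--     lo, hi = 0, len(prefix)
--     while lo < hi:
--         mid = (lo + hi) // 2
--         if prefix[mid] <= budget:
--             lo = mid + 1
--         else:
--             hi = mid
--     return lo
-- ===== Notes on version B (the rewrite author's own statement) =====
-- stated objective: alternative
-- what changed: Replaces the running-sum loop with early break by building a prefix-sum table of the per-cell increments once and binary-searching (bisect_right by hand) for the largest prefix within the 512-token budget.
import Mathlib
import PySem

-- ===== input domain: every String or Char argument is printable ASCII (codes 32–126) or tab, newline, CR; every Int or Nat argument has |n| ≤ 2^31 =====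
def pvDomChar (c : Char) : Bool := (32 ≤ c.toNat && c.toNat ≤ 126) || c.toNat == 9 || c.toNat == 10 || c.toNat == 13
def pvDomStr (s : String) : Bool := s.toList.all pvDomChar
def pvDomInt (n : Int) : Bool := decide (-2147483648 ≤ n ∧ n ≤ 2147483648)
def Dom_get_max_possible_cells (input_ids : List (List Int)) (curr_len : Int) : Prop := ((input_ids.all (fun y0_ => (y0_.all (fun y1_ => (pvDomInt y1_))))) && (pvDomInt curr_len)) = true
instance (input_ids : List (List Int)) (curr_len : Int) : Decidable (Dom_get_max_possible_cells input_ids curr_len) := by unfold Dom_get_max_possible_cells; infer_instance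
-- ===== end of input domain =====

-- B replaces A's running-sum loop with an early break by a prefix-sum table plus a
-- hand-written bisect_right binary search for the budget (alternative decomposition).

-- ===== PORT A =====
-- A's for-loop with break, as structural recursion over the same state (curr_len, num_cells).
def gmpcLoop : List (List Int) → Int → Int → Int
  | [], _, num_cells => num_cells
  | l :: rest, curr_len, num_cells =>
      let curr_len' := curr_len + max ((l.length : Int) - 2) 1
      if curr_len' > 512 then num_cells else gmpcLoop rest curr_len' (num_cells + 1)

def get_max_possible_cells (input_ids : List (List Int)) (curr_len : Int) : Int :=
  gmpcLoop input_ids (curr_len + 1) 0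

-- ===== PORT B =====
-- Source B's first loop: build the prefix-sum list of increments, running total s.
def gmpcPrefix : List (List Int) → Int → List Int
  | [], _ => []
  | l :: rest, s =>
      let s' := s + max ((l.length : Int) - 2) 1
      s' :: gmpcPrefix rest s'

-- Source B's while-loop: binary search (bisect_right) for budget in pre.
def gmpcBisect (pre : List Int) (budget : Int) (lo hi : Nat) : Nat :=
  if _h : lo < hi then
    let mid := (lo + hi) / 2
    if pre.getD mid 0 ≤ budget then gmpcBisect pre budget (mid + 1) hi
    else gmpcBisect pre budget lo mid
  else lo
termination_by hi - lo
decreasing_by all_goals omega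

def get_max_possible_cells_alt (input_ids : List (List Int)) (curr_len : Int) : Int :=
  let pre := gmpcPrefix input_ids 0
  let budget := 512 - (curr_len + 1)
  (gmpcBisect pre budget 0 pre.length : Int)

-- ===== PRECONDITION & SPEC =====
def Spec_get_max_possible_cells (input_ids : List (List Int)) (curr_len : Int) (out : Int) : Prop := out = get_max_possible_cells_alt input_ids curr_len
instance (input_ids : List (List Int)) (curr_len : Int) (out : Int) : Decidable (Spec_get_max_possible_cells input_ids curr_len out) := by unfold Spec_get_max_possible_cells; infer_instance

-- ===== CLAIM (what is proved, stated in full; the proofs are below) =====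
def Claim_equal_get_max_possible_cells : Prop := ∀ (input_ids : List (List Int)) (curr_len : Int), Dom_get_max_possible_cells input_ids curr_len → Spec_get_max_possible_cells input_ids curr_len (get_max_possible_cells input_ids curr_len)

-- ===== LEMMAS AND PROOFS =====

-- Every element of gmpcPrefix xs s is > s, and the list is sorted (pairwise ≤).
lemma gmpcPrefix_mem_gt : ∀ (xs : List (List Int)) (s y : Int), y ∈ gmpcPrefix xs s → s < y := by
  intro xs
  induction xs with
  | nil => intro s y h; simp [gmpcPrefix] at h
  | cons l rest ih =>
      intro s y h
      simp only [gmpcPrefix, List.mem_cons] at h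
      rcases h with h | h
      · subst h; have := le_max_right ((l.length : Int) - 2) 1; omega
      · have := ih _ _ h
        have := le_max_right ((l.length : Int) - 2) 1
        omega

lemma gmpcPrefix_pairwise : ∀ (xs : List (List Int)) (s : Int), (gmpcPrefix xs s).Pairwise (· ≤ ·) := by
  intro xs
  induction xs with
  | nil => intro s; simp [gmpcPrefix]
  | cons l rest ih =>
      intro s
      simp only [gmpcPrefix]
      refine List.pairwise_cons.mpr ⟨?_, ih _⟩
      intro y hy
      exact le_of_lt (gmpcPrefix_mem_gt _ _ _ hy)

-- Characterisation of takeWhile length on a sorted list as the elements ≤ b.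
lemma takeWhile_char : ∀ (p : List Int) (b : Int), p.Pairwise (· ≤ ·) →
    ∀ i : Nat, i < p.length →
      (p.getD i 0 ≤ b ↔ i < (p.takeWhile (fun x => decide (x ≤ b))).length) := by
  intro p
  induction p with
  | nil => intro b _ i hi; simp at hi
  | cons x xs ih =>
      intro b hpw i hi
      rcases List.pairwise_cons.mp hpw with ⟨hx, hxs⟩
      cases i with
      | zero =>
          rw [List.getD_cons_zero, List.takeWhile_cons]
          by_cases hxb : x ≤ b
          · simp [hxb]
          · simp [hxb]
      | succ j =>
          simp only [List.length_cons, Nat.succ_lt_succ_iff] at hi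
          rw [List.getD_cons_succ, List.takeWhile_cons]
          by_cases hxb : x ≤ b
          · simp only [hxb, decide_true, if_true, List.length_cons, Nat.succ_lt_succ_iff]
            exact ih b hxs j hi
          · have hmem : xs.getD j 0 ∈ xs := by
              rw [List.getD_eq_getElem _ _ hi]; exact List.getElem_mem hi
            have hxg : x ≤ xs.getD j 0 := hx _ hmem
            simp only [show decide (x ≤ b) = false from by simp [hxb],
              Bool.false_eq_true, if_false, List.length_nil]
            omega

-- The binary search returns the takeWhile length, for sorted p.
lemma gmpcBisect_eq : ∀ (n : Nat) (p : List Int) (b : Int), p.Pairwise (· ≤ ·) →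
    ∀ lo hi : Nat, hi - lo ≤ n → hi ≤ p.length →
      lo ≤ (p.takeWhile (fun x => decide (x ≤ b))).length →
      (p.takeWhile (fun x => decide (x ≤ b))).length ≤ hi →
      gmpcBisect p b lo hi = (p.takeWhile (fun x => decide (x ≤ b))).length := by
  intro n
  induction n with
  | zero =>
      intro p b _ lo hi hn hhi hlo hk
      rw [gmpcBisect]
      rw [dif_neg (by omega)]
      omega
  | succ n ih =>
      intro p b hpw lo hi hn hhi hlo hk
      rw [gmpcBisect]
      by_cases h : lo < hi
      · rw [dif_pos h]
        have hmid1 : lo ≤ (lo + hi) / 2 := by omega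
        have hmid2 : (lo + hi) / 2 < hi := by omega
        have hmidlen : (lo + hi) / 2 < p.length := by omega
        have hchar := takeWhile_char p b hpw ((lo + hi) / 2) hmidlen
        by_cases hle : p.getD ((lo + hi) / 2) 0 ≤ b
        · simp only [hle, if_true]
          exact ih p b hpw _ hi (by omega) hhi (by omega) hk
        · simp only [hle, if_false]
          have : ¬ ((lo + hi) / 2 < (p.takeWhile (fun x => decide (x ≤ b))).length) := by
            intro hc; exact hle (hchar.mpr hc)
          exact ih p b hpw lo _ (by omega) (by omega) hlo (by omega)
      · rw [dif_neg h]; omega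

-- A's loop counts exactly the pre sums (started at curr_len) that stay ≤ 512.
lemma gmpcLoop_eq_takeWhile : ∀ (xs : List (List Int)) (c n : Int),
    gmpcLoop xs c n = n + (((gmpcPrefix xs c).takeWhile (fun x => decide (x ≤ 512))).length : Int) := by
  intro xs
  induction xs with
  | nil => intro c n; simp [gmpcLoop, gmpcPrefix]
  | cons l rest ih =>
      intro c n
      simp only [gmpcLoop, gmpcPrefix]
      by_cases h : c + max ((l.length : Int) - 2) 1 > 512
      · rw [if_pos h]
        rw [List.takeWhile_cons]
        simp [show ¬ (c + max ((l.length : Int) - 2) 1 ≤ 512) from by omega]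
      · rw [if_neg h]
        rw [List.takeWhile_cons]
        simp only [show (decide (c + max ((l.length : Int) - 2) 1 ≤ 512)) = true from by
          simp; omega, if_true, List.length_cons]
        rw [ih]
        push_cast
        ring

-- Shifting the start of the pre sums shifts the threshold by the same amount.
lemma gmpcPrefix_shift : ∀ (xs : List (List Int)) (s t b : Int),
    ((gmpcPrefix xs (s + t)).takeWhile (fun x => decide (x ≤ b + t))).length
      = ((gmpcPrefix xs s).takeWhile (fun x => decide (x ≤ b))).length := by
  intro xs
  induction xs with
  | nil => intro s t b; simp [gmpcPrefix]
  | cons l rest ih =>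
      intro s t b
      simp only [gmpcPrefix]
      rw [List.takeWhile_cons, List.takeWhile_cons]
      have hiff : (s + t + max ((l.length : Int) - 2) 1 ≤ b + t)
          ↔ (s + max ((l.length : Int) - 2) 1 ≤ b) := by omega
      by_cases hc : s + max ((l.length : Int) - 2) 1 ≤ b
      · have hc' : s + t + max ((l.length : Int) - 2) 1 ≤ b + t := hiff.mpr hc
        simp only [hc, hc', decide_true, if_true, List.length_cons]
        have : s + t + max ((l.length : Int) - 2) 1
            = (s + max ((l.length : Int) - 2) 1) + t := by ring
        rw [this, ih]
      · have hc' : ¬ (s + t + max ((l.length : Int) - 2) 1 ≤ b + t) := fun h => hc (hiff.mp h)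
        simp [hc, hc']

-- ===== VERDICT (by name: the statement is the Claim_ definition above) =====
theorem get_max_possible_cells_spec : Claim_equal_get_max_possible_cells := by
  intro input_ids curr_len _
  unfold Spec_get_max_possible_cells get_max_possible_cells get_max_possible_cells_alt
  show gmpcLoop input_ids (curr_len + 1) 0 =
    ((gmpcBisect (gmpcPrefix input_ids 0) (512 - (curr_len + 1)) 0
      (gmpcPrefix input_ids 0).length : Nat) : Int)
  have hpw : (gmpcPrefix input_ids 0).Pairwise (· ≤ ·) := gmpcPrefix_pairwise _ _
  have hklen : ((gmpcPrefix input_ids 0).takeWhile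
      (fun x => decide (x ≤ 512 - (curr_len + 1)))).length ≤ (gmpcPrefix input_ids 0).length :=
    (List.takeWhile_sublist _).length_le
  rw [gmpcBisect_eq (gmpcPrefix input_ids 0).length _ _ hpw 0 _ (by omega) le_rfl
    (Nat.zero_le _) hklen]
  rw [gmpcLoop_eq_takeWhile]
  have hshift := gmpcPrefix_shift input_ids 0 (curr_len + 1) (512 - (curr_len + 1))
  simp only [zero_add] at hshift
  have hbt : 512 - (curr_len + 1) + (curr_len + 1) = 512 := by omega
  rw [hbt] at hshift
  rw [← hshift]
  simp
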